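-- pv_equiv track=rewrite | github.com/rishipython/atlas | experiment/build_rlm_memory_bank.py | _take_sentences
-- ===== SOURCE A (Python) =====
-- def _take_sentences(text: str, max_chars: int) -> str:
--     """Greedily take leading sentences until budget is hit."""
--     text = (text or "").strip()
--     if len(text) <= max_chars:
--         return text
--     out: list[str] = []
--     remaining = max_chars
--     # Split on hard stops so we don't chop mid-clause.
--     for sent in text.replace("\n\n", ". ").split(". "):
--         sent = sent.strip()
--         if not sent:
--             continue
--         if len(sent) + 2 > remaining:
--             break
--         out.append(sent)
--         remaining -= len(sent) + 2
--     return ". ".join(out).strip() + "."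
-- ===== SOURCE B (Python) =====
-- def _take_sentences(text: str, max_chars: int) -> str:
--     """Prefix-sum reformulation: cutoff index instead of a greedy break."""
--     text = (text or "").strip()
--     if len(text) <= max_chars:
--         return text
--     sents = [s for s in (p.strip() for p in text.replace("\n\n", ". ").split(". ")) if s]
--     total = 0
--     costs = []
--     for s in sents:
--         total += len(s) + 2
--         costs.append(total)
--     k = sum(1 for c in costs if c <= max_chars)
--     return ". ".join(sents[:k]).strip() + "."
-- ===== Notes on version B (the rewrite author's own statement) =====
-- stated objective: alternative
-- what changed: Replaces the greedy break-loop with decreasing budget by first cleaning the sentence list, building the running-total (prefix-sum) cost list, counting how many prefix sums fit the budget (valid because costs are strictly positive, so prefix sums are increasing), and slicing the first k sentences.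
import Mathlib
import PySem

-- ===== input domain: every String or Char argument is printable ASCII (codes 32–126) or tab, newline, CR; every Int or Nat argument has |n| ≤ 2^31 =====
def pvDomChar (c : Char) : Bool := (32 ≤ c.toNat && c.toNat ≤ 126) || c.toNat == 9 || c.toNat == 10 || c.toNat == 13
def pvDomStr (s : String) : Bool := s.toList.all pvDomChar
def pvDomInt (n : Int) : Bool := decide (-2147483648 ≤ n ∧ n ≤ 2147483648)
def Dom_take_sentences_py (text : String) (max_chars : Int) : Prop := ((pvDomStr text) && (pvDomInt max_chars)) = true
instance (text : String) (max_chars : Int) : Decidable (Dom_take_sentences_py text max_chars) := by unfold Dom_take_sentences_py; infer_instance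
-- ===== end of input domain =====

-- ===== PORT A =====
-- B changes A's greedy break-loop into a prefix-sum cutoff count (alternative decomposition, same cost).
-- A's loop: strip each piece, skip empties, break when the next cost exceeds the remaining budget.
def takeLoopA : List String → List String → Int → List String
  | [], out, _ => out
  | p :: rest, out, remaining =>
      let s := PySem.Str.strip p
      if s = "" then takeLoopA rest out remaining
      else if PySem.Str.len s + 2 > remaining then out
      else takeLoopA rest (out ++ [s]) (remaining - (PySem.Str.len s + 2))

def take_sentences_py (text : String) (max_chars : Int) : String :=
  let text := PySem.Str.strip text
  if PySem.Str.len text ≤ max_chars then text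
  else
    let parts := (PySem.Str.split? (PySem.Str.replace text "\n\n" ". ") ". ").getD []
    let out := takeLoopA parts [] max_chars
    PySem.Str.strip (PySem.Str.join ". " out) ++ "."

-- ===== PORT B =====
-- running-total loop of Source B: total += len(s)+2; costs.append(total)
def costsB : List String → Int → List Int
  | [], _ => []
  | s :: rest, total => (total + PySem.Str.len s + 2) :: costsB rest (total + PySem.Str.len s + 2)

def take_sentences_py_alt (text : String) (max_chars : Int) : String :=
  let text := PySem.Str.strip text
  if PySem.Str.len text ≤ max_chars then text
  else
    let parts := (PySem.Str.split? (PySem.Str.replace text "\n\n" ". ") ". ").getD []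
    let sents := (parts.map PySem.Str.strip).filter (fun s => s ≠ "")
    let costs := costsB sents 0
    let k := costs.countP (fun c => c ≤ max_chars)
    PySem.Str.strip (PySem.Str.join ". " (sents.take k)) ++ "."

-- ===== PRECONDITION & SPEC =====
def Spec_take_sentences_py (text : String) (max_chars : Int) (out : String) : Prop := out = take_sentences_py_alt text max_chars
instance (text : String) (max_chars : Int) (out : String) : Decidable (Spec_take_sentences_py text max_chars out) := by unfold Spec_take_sentences_py; infer_instance

-- ===== CLAIM (what is proved, stated in full; the proofs are below) =====
def Claim_equal_take_sentences_py : Prop := ∀ (text : String) (max_chars : Int), Dom_take_sentences_py text max_chars → Spec_take_sentences_py text max_chars (take_sentences_py text max_chars)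

-- ===== LEMMAS AND PROOFS =====
-- greedy on the already-cleaned sentence list, no accumulator
def greedyClean : List String → Int → List String
  | [], _ => []
  | s :: rest, r =>
      if PySem.Str.len s + 2 > r then []
      else s :: greedyClean rest (r - (PySem.Str.len s + 2))

-- A's loop equals accumulator ++ greedy on the cleaned list
theorem takeLoopA_eq (parts : List String) :
    ∀ (out : List String) (r : Int),
      takeLoopA parts out r = out ++ greedyClean ((parts.map PySem.Str.strip).filter (fun s => s ≠ "")) r := by
  induction parts with
  | nil => intro out r; simp only [takeLoopA, greedyClean, List.map_nil, List.filter_nil, List.append_nil]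
  | cons p rest ih =>
      intro out r
      simp only [takeLoopA, List.map_cons]
      by_cases hs : PySem.Str.strip p = ""
      · rw [if_pos hs, List.filter_cons_of_neg (by simp [hs]), ih]
      · rw [if_neg hs, List.filter_cons_of_pos (by simp [hs])]
        by_cases hb : PySem.Str.len (PySem.Str.strip p) + 2 > r
        · rw [if_pos hb]
          simp only [greedyClean]
          rw [if_pos hb, List.append_nil]
        · rw [if_neg hb, ih]
          simp only [greedyClean]
          rw [if_neg hb]
          simp

-- every running total in costsB exceeds the starting total
theorem costsB_gt (ss : List String) : ∀ (t : Int), ∀ c ∈ costsB ss t, t < c := by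
  induction ss with
  | nil => intro t c hc; simp [costsB] at hc
  | cons s rest ih =>
      intro t c hc
      simp only [costsB, List.mem_cons] at hc
      have hlen : 0 ≤ PySem.Str.len s := by simp [PySem.Str.len_eq]
      rcases hc with h | h
      · omega
      · have := ih (t + PySem.Str.len s + 2) c h; omega

-- the greedy prefix is exactly the cutoff-count prefix
theorem greedy_eq_take_count (ss : List String) :
    ∀ (t r : Int),
      greedyClean ss (r - t) = ss.take ((costsB ss t).countP (fun c => c ≤ r)) := by
  induction ss with
  | nil => intro t r; simp [greedyClean, costsB]
  | cons s rest ih =>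
      intro t r
      by_cases hb : PySem.Str.len s + 2 > r - t
      · have hz : (costsB (s :: rest) t).countP (fun c => c ≤ r) = 0 := by
          rw [List.countP_eq_zero]
          intro c hc
          simp only [costsB, List.mem_cons] at hc
          have hgt : r < c := by
            rcases hc with h | h
            · omega
            · have := costsB_gt rest (t + PySem.Str.len s + 2) c h; omega
          simpa using hgt
        rw [hz]
        simp only [greedyClean]
        rw [if_pos hb, List.take_zero]
      · have hle : t + PySem.Str.len s + 2 ≤ r := by omega
        have hcount : (costsB (s :: rest) t).countP (fun c => c ≤ r)
            = (costsB rest (t + PySem.Str.len s + 2)).countP (fun c => c ≤ r) + 1 := by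
          simp only [costsB, List.countP_cons, decide_eq_true hle, if_true]
        rw [hcount]
        simp only [greedyClean]
        rw [if_neg hb, List.take_succ_cons,
          show r - t - (PySem.Str.len s + 2) = r - (t + PySem.Str.len s + 2) by ring,
          ih (t + PySem.Str.len s + 2) r]

theorem greedy_eq_take_count0 (ss : List String) (r : Int) :
    greedyClean ss r = ss.take ((costsB ss 0).countP (fun c => c ≤ r)) := by
  have := greedy_eq_take_count ss 0 r
  rwa [sub_zero] at this

-- ===== VERDICT (by name: the statement is the Claim_ definition above) =====
theorem take_sentences_py_spec : Claim_equal_take_sentences_py := by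
  intro text max_chars _
  unfold Spec_take_sentences_py take_sentences_py take_sentences_py_alt
  by_cases h : PySem.Str.len (PySem.Str.strip text) ≤ max_chars
  · rw [if_pos h, if_pos h]
  · rw [if_neg h, if_neg h]
    simp only [takeLoopA_eq, List.nil_append, greedy_eq_take_count0]
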